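-- pv_equiv track=rewrite | github.com/Eiphodos/DATX02 | server/userdata/Bucketizer.py | rev_bucket_loud
-- ===== SOURCE A (Python) =====
-- def rev_bucket_loud(loud):
--     buckets = [-30, -25, -20, -15, -10, -5, 0]
--     count = 0
--     for b in buckets:
--         if (loud <= b):
--             return count
--         count += 1
--     return count
-- ===== SOURCE B (Python) =====
-- import bisect
--
-- def rev_bucket_loud(loud):
--     return bisect.bisect_left([-30, -25, -20, -15, -10, -5, 0], loud)
-- ===== Notes on version B (the rewrite author's own statement) =====
-- stated objective: idiomatic
-- what changed: Replaced the sequential threshold scan with a counter by a stdlib binary search (bisect.bisect_left) over the same sorted threshold list.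
import Mathlib
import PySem

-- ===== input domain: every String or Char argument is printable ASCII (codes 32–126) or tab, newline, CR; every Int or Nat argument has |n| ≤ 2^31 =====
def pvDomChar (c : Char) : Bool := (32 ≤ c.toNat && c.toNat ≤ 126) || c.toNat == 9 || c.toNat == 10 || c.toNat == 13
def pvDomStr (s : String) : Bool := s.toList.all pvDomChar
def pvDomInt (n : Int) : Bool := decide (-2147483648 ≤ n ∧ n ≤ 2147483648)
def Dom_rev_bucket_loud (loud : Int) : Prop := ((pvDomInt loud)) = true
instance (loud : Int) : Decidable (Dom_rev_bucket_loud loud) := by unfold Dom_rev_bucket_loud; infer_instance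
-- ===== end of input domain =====

-- B: stdlib binary search (bisect.bisect_left) over the same sorted threshold list,
-- replacing A's sequential scan with a counter. Equivalence proved for all loud in Dom.
-- ===== PORT A =====
-- the 'for b in buckets' loop with its early return, as structural recursion over the list
def pvScanA : List Int → Int → Int → Int
  | [], _, count => count
  | b :: bs, loud, count => if loud ≤ b then count else pvScanA bs loud (count + 1)

def rev_bucket_loud (loud : Int) : Int :=
  pvScanA [-30, -25, -20, -15, -10, -5, 0] loud 0

-- ===== PORT B =====
-- bisect.bisect_left's while-loop: while lo < hi: mid = (lo+hi)//2; if a[mid] < x: lo = mid+1 else: hi = mid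
def pvBisectLeft (a : List Int) (x : Int) (lo hi : Nat) : Nat :=
  if lo < hi then
    let mid := (lo + hi) / 2
    if a.getD mid 0 < x then pvBisectLeft a x (mid + 1) hi
    else pvBisectLeft a x lo mid
  else lo
  termination_by hi - lo
  decreasing_by all_goals omega

def rev_bucket_loud_alt (loud : Int) : Int :=
  Int.ofNat (pvBisectLeft [-30, -25, -20, -15, -10, -5, 0] loud 0 7)

-- ===== PRECONDITION & SPEC =====
def Spec_rev_bucket_loud (loud : Int) (out : Int) : Prop := out = rev_bucket_loud_alt loud
instance (loud : Int) (out : Int) : Decidable (Spec_rev_bucket_loud loud out) := by unfold Spec_rev_bucket_loud; infer_instance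

-- ===== CLAIM (what is proved, stated in full; the proofs are below) =====
def Claim_equal_rev_bucket_loud : Prop := ∀ (loud : Int), Dom_rev_bucket_loud loud → Spec_rev_bucket_loud loud (rev_bucket_loud loud)

-- ===== LEMMAS AND PROOFS =====

-- ===== VERDICT (by name: the statement is the Claim_ definition above) =====
theorem rev_bucket_loud_spec : Claim_equal_rev_bucket_loud := by
  intro loud _
  unfold Spec_rev_bucket_loud
  simp only [rev_bucket_loud, rev_bucket_loud_alt, pvScanA]
  repeat (rw [pvBisectLeft]; norm_num [List.getD])
  split_ifs <;> omega
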